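-- pv_equiv track=rewrite | github.com/michaeltomlinsontuks/ScheduleGenerator | V2/preview_generator.py | generate_preview_summary
-- ===== SOURCE A (Python) =====
-- from typing import List, Dict, Any
--
-- def generate_preview_summary(events: List[Dict[str, Any]]) -> str:
--     """
--     Generates a human-readable text summary of the schedule events.
--
--     Args:
--         events: A list of processed event dictionaries.
--
--     Returns:
--         A formatted string summarizing the schedule.
--     """
--     if not events:
--         return "No events to preview."
--
--     summary = "--- Schedule Preview ---\n\n"
--     summary += f"Found {len(events)} total events.\n\n"
--
--     # Group events by day for better readability
--     events_by_day = {}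
--     for event in events:
--         day = event.get('Day', 'No Day')
--         if day not in events_by_day:
--             events_by_day[day] = []
--         events_by_day[day].append(event)
--
--     for day, day_events in sorted(events_by_day.items()):
--         summary += f"--- {day} ---\n"
--         for event in sorted(day_events, key=lambda x: x.get('start_time', '')):
--             summary += f"  - {event['summary']}: {event.get('start_time', '')} - {event.get('end_time', '')} @ {event.get('location', 'N/A')}\n"
--         summary += "\n"
--
--     return summary
-- ===== SOURCE B (Python) =====
-- def generate_preview_summary(events):
--     if not events:
--         return "No events to preview."
--     parts = ["--- Schedule Preview ---\n\n", f"Found {len(events)} total events.\n\n"]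
--     for day in sorted({e.get('Day', 'No Day') for e in events}):
--         parts.append(f"--- {day} ---\n")
--         todays = [e for e in events if e.get('Day', 'No Day') == day]
--         for event in sorted(todays, key=lambda x: x.get('start_time', '')):
--             parts.append(f"  - {event['summary']}: {event.get('start_time', '')} - {event.get('end_time', '')} @ {event.get('location', 'N/A')}\n")
--         parts.append("\n")
--     return "".join(parts)
-- ===== Notes on version B (the rewrite author's own statement) =====
-- stated objective: alternative
-- what changed: Replaces the events_by_day dict plus sorted(items) with sorting the distinct day values once and filtering the event list per day, accumulating output parts in a list joined at the end instead of string concatenation.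
import Mathlib
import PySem

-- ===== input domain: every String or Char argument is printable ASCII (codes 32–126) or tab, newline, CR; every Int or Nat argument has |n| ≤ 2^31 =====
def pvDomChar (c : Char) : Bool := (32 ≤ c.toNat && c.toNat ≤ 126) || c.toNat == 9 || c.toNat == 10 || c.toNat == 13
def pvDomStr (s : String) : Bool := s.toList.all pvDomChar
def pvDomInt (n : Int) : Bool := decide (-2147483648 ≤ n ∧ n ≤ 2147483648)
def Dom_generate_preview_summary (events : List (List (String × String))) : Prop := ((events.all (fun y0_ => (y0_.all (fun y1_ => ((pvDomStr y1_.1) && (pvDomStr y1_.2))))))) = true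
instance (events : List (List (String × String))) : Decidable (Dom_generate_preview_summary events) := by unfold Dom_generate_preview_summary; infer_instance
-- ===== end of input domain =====

-- B builds the summary by sorting the distinct days once and filtering the events per day,
-- collecting the output pieces in a list joined at the end (no grouping dict); return values proved equal.

-- event dict lookups, shared by both ports (both Pythons use the identical lookups and format string)
def evGetD (e : List (String × String)) (k dflt : String) : String :=
  (PySem.Dict.ofList e).getD k dflt

def evGet? (e : List (String × String)) (k : String) : Option String :=
  (PySem.Dict.ofList e).get? k

def dayOf (e : List (String × String)) : String := evGetD e "Day" "No Day"

-- the per-event output line; event['summary'] raises KeyError when absent — Pre_ excludes that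
def lineOf (e : List (String × String)) : String :=
  "  - " ++ ((evGet? e "summary").getD "") ++ ": " ++ evGetD e "start_time" "" ++ " - "
    ++ evGetD e "end_time" "" ++ " @ " ++ evGetD e "location" "N/A" ++ "\n"

-- ===== PORT A =====
-- sorted(events_by_day.items()) compares (day, day_events) tuples; a dict's keys are distinct, so the
-- comparison never reads the second component: ported as a sort keyed by the first component.
def generate_preview_summary (events : List (List (String × String))) : String :=
  if events = [] then "No events to preview."
  else
    let summary := "--- Schedule Preview ---\n\n"
      ++ ("Found " ++ PySem.Int.toStr (events.length : Int) ++ " total events.\n\n")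
    -- if day not in events_by_day: events_by_day[day] = [] ; events_by_day[day].append(event)
    let events_by_day : PySem.Dict String (List (List (String × String))) :=
      events.foldl (fun d e => d.modify (dayOf e) [] (· ++ [e])) PySem.Dict.empty
    (PySem.List.sorted events_by_day.items (fun p => p.1) false).foldl
      (fun s p =>
        ((PySem.List.sorted p.2 (fun e => evGetD e "start_time" "") false).foldl
            (fun s e => s ++ lineOf e)
            (s ++ ("--- " ++ p.1 ++ " ---\n"))) ++ "\n")
      summary

-- ===== PORT B =====
def generate_preview_summary_alt (events : List (List (String × String))) : String :=
  if events = [] then "No events to preview."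
  else
    let parts := ["--- Schedule Preview ---\n\n",
                  "Found " ++ PySem.Int.toStr (events.length : Int) ++ " total events.\n\n"]
    let parts :=
      (PySem.List.sorted (PySem.Set.ofList (events.map dayOf)) (fun x => x) false).foldl
        (fun ps day =>
          let todays := events.filter (fun e => dayOf e == day)
          ((PySem.List.sorted todays (fun e => evGetD e "start_time" "") false).foldl
              (fun ps e => ps ++ [lineOf e])
              (ps ++ ["--- " ++ day ++ " ---\n"])) ++ ["\n"])
        parts
    String.join parts  -- "".join(parts)

-- ===== PRECONDITION & SPEC =====
-- Pre_ excludes only the inputs where Python A raises KeyError: a nonempty list containing an event without a 'summary' key.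
def Pre_generate_preview_summary (events : List (List (String × String))) : Prop :=
  events = [] ∨ ∀ e ∈ events, (PySem.Dict.ofList e).contains "summary" = true
instance (events : List (List (String × String))) : Decidable (Pre_generate_preview_summary events) := by
  unfold Pre_generate_preview_summary; infer_instance

def pvWitness_generate_preview_summary : (List (List (String × String))) :=
  [[("summary", "Lecture"), ("Day", "Mon"), ("start_time", "09:00")], [("summary", "Lab")]]

def Spec_generate_preview_summary (events : List (List (String × String))) (out : String) : Prop := out = generate_preview_summary_alt events
instance (events : List (List (String × String))) (out : String) : Decidable (Spec_generate_preview_summary events out) := by unfold Spec_generate_preview_summary; infer_instance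

-- ===== CLAIM (what is proved, stated in full; the proofs are below) =====
def Claim_equal_generate_preview_summary : Prop := ∀ (events : List (List (String × String))), Dom_generate_preview_summary events → Pre_generate_preview_summary events → Spec_generate_preview_summary events (generate_preview_summary events)

-- ===== LEMMAS AND PROOFS =====

theorem sfoldl_shift (t : List String) : ∀ (a : String), t.foldl (· ++ ·) a = a ++ t.foldl (· ++ ·) "" := by
  induction t with
  | nil => simp
  | cons b t ih =>
    intro a; simp only [List.foldl_cons]
    rw [ih (a ++ b), ih ("" ++ b), String.append_assoc]; simp

theorem sjoin_cons (a : String) (l : List String) : String.join (a :: l) = a ++ String.join l := by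
  simp only [String.join, List.foldl_cons]; rw [sfoldl_shift]; simp

theorem sjoin_append (a b : List String) : String.join (a ++ b) = String.join a ++ String.join b := by
  induction a with
  | nil => simp [String.join]
  | cons x t ih => simp only [List.cons_append, sjoin_cons, ih, String.append_assoc]

-- a fold appending strings is the starting string followed by the join of the pieces
theorem foldl_str_append {α : Type} (f : α → String) :
    ∀ (l : List α) (s : String), l.foldl (fun s e => s ++ f e) s = s ++ String.join (l.map f) := by
  intro l; induction l with
  | nil => simp [String.join]
  | cons x t ih => intro s; simp only [List.foldl_cons, List.map_cons, sjoin_cons, ih, String.append_assoc]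

theorem sjoin_flatMap {α : Type} (f : α → List String) (l : List α) :
    String.join (l.flatMap f) = String.join (l.map (fun x => String.join (f x))) := by
  induction l with
  | nil => rfl
  | cons x t ih => simp only [List.flatMap_cons, List.map_cons, sjoin_append, sjoin_cons, ih]

-- A's grouping dict characterised: keys, key uniqueness, and each day's bucket
theorem grouped_keys (events : List (List (String × String))) :
    (events.foldl (fun d e => d.modify (dayOf e) [] (· ++ [e]))
      (PySem.Dict.empty : PySem.Dict String (List (List (String × String))))).keys
    = PySem.Set.ofList (events.map dayOf) := by
  rw [PySem.Dict.keys_foldl_modify_key]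
  show PySem.Set.update [] _ = _
  rw [PySem.Set.update_nil_left]

theorem grouped_nodup (events : List (List (String × String))) :
    (events.foldl (fun d e => d.modify (dayOf e) [] (· ++ [e]))
      (PySem.Dict.empty : PySem.Dict String (List (List (String × String))))).keys.Nodup :=
  PySem.Dict.nodup_keys_foldl_modify_key _ _ _ _ _ PySem.Dict.nodup_keys_empty

theorem grouped_getD (events : List (List (String × String))) (c : String) :
    (events.foldl (fun d e => d.modify (dayOf e) [] (· ++ [e]))
      (PySem.Dict.empty : PySem.Dict String (List (List (String × String))))).getD c []
    = events.filter (fun e => dayOf e == c) := by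
  have h : events.foldl (fun d e => d.modify (dayOf e) [] (· ++ [e]))
      (PySem.Dict.empty : PySem.Dict String (List (List (String × String))))
    = (events.map (fun e => (dayOf e, e))).foldl (fun d p => d.modify p.1 [] (· ++ [p.2])) PySem.Dict.empty := by
    rw [List.foldl_map]
  rw [h, PySem.Dict.getD_foldl_modify_append]
  simp [List.filter_map]
  simp [Function.comp_def]

-- A's sorted grouped items are the sorted distinct days, each paired with that day's filtered events
theorem items_sorted_eq (events : List (List (String × String))) :
    PySem.List.sorted (events.foldl (fun d e => d.modify (dayOf e) [] (· ++ [e]))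
        (PySem.Dict.empty : PySem.Dict String (List (List (String × String))))).items (fun p => p.1) false
      = (PySem.List.sorted (PySem.Set.ofList (events.map dayOf)) (fun x => x) false).map
          (fun day => (day, events.filter (fun e => dayOf e == day))) := by
  set g := events.foldl (fun d e => d.modify (dayOf e) [] (· ++ [e]))
        (PySem.Dict.empty : PySem.Dict String (List (List (String × String)))) with hg
  apply PySem.List.sorted_eq_of_perm_of_pairwise_lt
  · have h1 : g.items = g.keys.map (fun k => (k, g.getD k [])) :=
      PySem.Dict.items_eq_map_keys g (grouped_nodup events) []
    have h2 : (fun day => (day, events.filter (fun e => dayOf e == day)))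
        = (fun k => (k, g.getD k [])) := by
      funext k; rw [hg, grouped_getD]
    rw [h2, h1, ← grouped_keys events]
    exact List.Perm.map _ (PySem.List.sorted_perm _ _ _)
  · rw [List.pairwise_map]
    exact PySem.List.sorted_ofList_pairwise_lt _

-- ===== VERDICT (by name: the statement is the Claim_ definition above) =====
theorem generate_preview_summary_spec : Claim_equal_generate_preview_summary := by
  intro events _ _
  unfold Spec_generate_preview_summary generate_preview_summary generate_preview_summary_alt
  by_cases h : events = []
  · simp [h]
  · simp only [if_neg h]
    rw [items_sorted_eq, List.foldl_map]
    have hA : (fun (s : String) (day : String) =>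
        ((PySem.List.sorted (events.filter (fun e => dayOf e == day)) (fun e => evGetD e "start_time" "") false).foldl
            (fun s e => s ++ lineOf e) (s ++ ("--- " ++ day ++ " ---\n"))) ++ "\n")
        = (fun s day => s ++ (("--- " ++ day ++ " ---\n")
            ++ (String.join ((PySem.List.sorted (events.filter (fun e => dayOf e == day)) (fun e => evGetD e "start_time" "") false).map lineOf) ++ "\n"))) := by
      funext s day
      rw [foldl_str_append]
      simp [String.append_assoc]
    rw [hA, foldl_str_append]
    have hB : (fun (ps : List String) (day : String) =>
        let todays := events.filter (fun e => dayOf e == day)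
        ((PySem.List.sorted todays (fun e => evGetD e "start_time" "") false).foldl
            (fun ps e => ps ++ [lineOf e]) (ps ++ ["--- " ++ day ++ " ---\n"])) ++ ["\n"])
        = (fun ps day => ps ++ (("--- " ++ day ++ " ---\n")
            :: ((PySem.List.sorted (events.filter (fun e => dayOf e == day)) (fun e => evGetD e "start_time" "") false).map lineOf ++ ["\n"]))) := by
      funext ps day
      dsimp only
      rw [PySem.List.foldl_append_singleton_eq_map]
      simp
    rw [hB, PySem.List.foldl_append_eq_flatMap]
    rw [sjoin_append, sjoin_flatMap]
    have h2 : ∀ day : String, String.join ((PySem.List.sorted (events.filter (fun e => dayOf e == day)) (fun e => evGetD e "start_time" "") false).map lineOf ++ ["\n"])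
        = String.join ((PySem.List.sorted (events.filter (fun e => dayOf e == day)) (fun e => evGetD e "start_time" "") false).map lineOf) ++ "\n" := by
      intro day; rw [sjoin_append]; simp [sjoin_cons, String.join]
    simp only [sjoin_cons, h2]
    congr 1
    simp [sjoin_cons, String.join]
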